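-- pv_equiv track=rewrite | github.com/chunghaw/mind_mate | examples/test_scenario.py | count_consecutive_low
-- ===== SOURCE A (Python) =====
-- def count_consecutive_low(moods, threshold=3):
--     """Count maximum consecutive days with mood <= threshold"""
--     max_consecutive = 0
--     current_consecutive = 0
--
--     for mood in moods:
--         if mood <= threshold:
--             current_consecutive += 1
--             max_consecutive = max(max_consecutive, current_consecutive)
--         else:
--             current_consecutive = 0
--
--     return max_consecutive
-- ===== SOURCE B (Python) =====
-- def count_consecutive_low(moods, threshold=3):
--     """Count maximum consecutive days with mood <= threshold"""
--     best = 0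
--     i = 0
--     n = len(moods)
--     while i < n:
--         key = moods[i] <= threshold
--         j = i + 1
--         while j < n and (moods[j] <= threshold) == key:
--             j += 1
--         if key:
--             best = max(best, j - i)
--         i = j
--     return best
-- ===== Notes on version B (the rewrite author's own statement) =====
-- stated objective: alternative
-- what changed: B splits the list into maximal runs of equal low/high status (a groupby-style span scan) and takes the maximum length of the low runs, instead of A's element-wise running counter with an inline max.
import Mathlib
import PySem

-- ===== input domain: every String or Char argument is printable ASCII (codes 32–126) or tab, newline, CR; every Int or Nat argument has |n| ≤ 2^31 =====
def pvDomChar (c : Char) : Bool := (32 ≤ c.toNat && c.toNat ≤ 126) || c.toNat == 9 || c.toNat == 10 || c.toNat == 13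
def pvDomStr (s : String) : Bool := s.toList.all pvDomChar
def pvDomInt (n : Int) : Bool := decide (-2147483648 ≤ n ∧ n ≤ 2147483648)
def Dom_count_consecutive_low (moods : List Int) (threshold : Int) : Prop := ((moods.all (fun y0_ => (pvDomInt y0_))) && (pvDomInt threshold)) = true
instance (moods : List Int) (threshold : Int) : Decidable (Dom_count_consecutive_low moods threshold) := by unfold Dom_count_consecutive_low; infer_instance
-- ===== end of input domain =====

-- B replaces A's running counter + inline max by a groupby-style split into maximal
-- runs of equal low/high status, reducing over the lengths of the low runs.

-- ===== PORT A =====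
-- running state (max_consecutive, current_consecutive), updated per mood as in A
def count_consecutive_low (moods : List Int) (threshold : Int) : Int :=
  (moods.foldl
    (fun (st : Int × Int) mood =>
      if mood ≤ threshold then (max st.1 (st.2 + 1), st.2 + 1) else (st.1, 0))
    (0, 0)).1

-- ===== PORT B =====
-- one step per maximal run: the inner while loop is the takeWhile/dropWhile span
def countAltGo (threshold : Int) : List Int → Int
  | [] => 0
  | x :: xs =>
      let key : Bool := decide (x ≤ threshold)
      let run := xs.takeWhile (fun y => decide (y ≤ threshold) == key)
      let rest := xs.dropWhile (fun y => decide (y ≤ threshold) == key)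
      let b := countAltGo threshold rest
      if key then max b (1 + (run.length : Int)) else b
termination_by l => l.length
decreasing_by
  simpa using Nat.lt_succ_of_le (List.length_dropWhile_le _ xs)

def count_consecutive_low_alt (moods : List Int) (threshold : Int) : Int :=
  countAltGo threshold moods

-- ===== PRECONDITION & SPEC =====
def Spec_count_consecutive_low (moods : List Int) (threshold : Int) (out : Int) : Prop := out = count_consecutive_low_alt moods threshold
instance (moods : List Int) (threshold : Int) (out : Int) : Decidable (Spec_count_consecutive_low moods threshold out) := by unfold Spec_count_consecutive_low; infer_instance

-- ===== CLAIM (what is proved, stated in full; the proofs are below) =====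
def Claim_equal_count_consecutive_low : Prop := ∀ (moods : List Int) (threshold : Int), Dom_count_consecutive_low moods threshold → Spec_count_consecutive_low moods threshold (count_consecutive_low moods threshold)

-- ===== LEMMAS AND PROOFS =====

-- length of the leading run of elements satisfying p
def pvLead (p : Int → Bool) : List Int → Int
  | [] => 0
  | x :: xs => if p x then 1 + pvLead p xs else 0

-- maximal run length of elements satisfying p (the mathematical spec both ports meet)
def pvBest (p : Int → Bool) : List Int → Int
  | [] => 0
  | x :: xs => if p x then max (1 + pvLead p xs) (pvBest p xs) else pvBest p xs

theorem pvLead_nonneg (p : Int → Bool) (l : List Int) : 0 ≤ pvLead p l := by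
  induction l with
  | nil => simp [pvLead]
  | cons x xs ih => simp only [pvLead]; split <;> omega

theorem pvBest_nonneg (p : Int → Bool) (l : List Int) : 0 ≤ pvBest p l := by
  induction l with
  | nil => simp [pvBest]
  | cons x xs ih => simp only [pvBest]; split <;> omega

theorem pvLead_le_best (p : Int → Bool) (l : List Int) : pvLead p l ≤ pvBest p l := by
  induction l with
  | nil => simp [pvLead, pvBest]
  | cons x xs ih =>
      simp only [pvLead, pvBest]
      have := pvBest_nonneg p xs
      split <;> omega

theorem pvBest_false_prefix (p : Int → Bool) (l r : List Int)
    (h : ∀ y ∈ l, p y = false) : pvBest p (l ++ r) = pvBest p r := by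
  induction l with
  | nil => simp
  | cons x xs ih =>
      have hx : p x = false := h x (by simp)
      simp only [List.cons_append, pvBest, hx]
      exact ih (fun y hy => h y (by simp [hy]))

theorem pvLead_true_prefix (p : Int → Bool) (l r : List Int)
    (h : ∀ y ∈ l, p y = true) : pvLead p (l ++ r) = (l.length : Int) + pvLead p r := by
  induction l with
  | nil => simp
  | cons x xs ih =>
      have hx : p x = true := h x (by simp)
      have := ih (fun y hy => h y (by simp [hy]))
      simp only [List.cons_append, pvLead, hx, if_true, this, List.length_cons]
      push_cast
      ring

theorem pvBest_true_prefix (p : Int → Bool) (l r : List Int)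
    (h : ∀ y ∈ l, p y = true) :
    pvBest p (l ++ r) = max ((l.length : Int) + pvLead p r) (pvBest p r) := by
  induction l with
  | nil =>
      have := pvLead_le_best p r
      simp; omega
  | cons x xs ih =>
      have hx : p x = true := h x (by simp)
      have htail : ∀ y ∈ xs, p y = true := fun y hy => h y (by simp [hy])
      have hlead := pvLead_true_prefix p xs r htail
      simp only [List.cons_append, pvBest, hx, if_true, hlead, ih htail, List.length_cons]
      push_cast
      omega

theorem pvLead_dropWhile (p : Int → Bool) (l : List Int) :
    pvLead p (l.dropWhile p) = 0 := by
  induction l with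
  | nil => simp [pvLead]
  | cons x xs ih =>
      by_cases hx : p x = true
      · simpa [List.dropWhile, hx] using ih
      · simp only [Bool.not_eq_true] at hx
        simp [List.dropWhile, hx, pvLead]

-- B computes pvBest
theorem countAltGo_eq_best (threshold : Int) (l : List Int) :
    countAltGo threshold l = pvBest (fun y => decide (y ≤ threshold)) l := by
  generalize hn : l.length = n
  induction n using Nat.strong_induction_on generalizing l with
  | _ n ih =>
    cases l with
    | nil => simp [countAltGo, pvBest]
    | cons x xs =>
      set p : Int → Bool := fun y => decide (y ≤ threshold) with hp
      by_cases hx : p x = true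
      · have hq : (fun y => decide (y ≤ threshold) == decide (x ≤ threshold)) = p := by
          funext y
          simp only [hp] at hx ⊢
          simp [hx]
        have hdw : (xs.dropWhile p).length < n := by
          have := List.length_dropWhile_le p xs
          simp only [List.length_cons] at hn
          omega
        have hrest := ih _ hdw (xs.dropWhile p) rfl
        have htw : ∀ y ∈ xs.takeWhile p, p y = true := fun y hy =>
          List.mem_takeWhile_imp hy
        have hsplit : xs = xs.takeWhile p ++ xs.dropWhile p := (List.takeWhile_append_dropWhile).symm
        have hbest : pvBest p xs
            = max (((xs.takeWhile p).length : Int) + pvLead p (xs.dropWhile p)) (pvBest p (xs.dropWhile p)) := by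
          conv_lhs => rw [hsplit]
          exact pvBest_true_prefix p _ _ htw
        have hlead : pvLead p xs = ((xs.takeWhile p).length : Int) + pvLead p (xs.dropWhile p) := by
          conv_lhs => rw [hsplit]
          exact pvLead_true_prefix p _ _ htw
        simp only [countAltGo, hq, hp] at *
        simp only [hx, if_true, hrest, pvBest, hbest, hlead, pvLead_dropWhile]
        omega
      · simp only [Bool.not_eq_true] at hx
        have hq : (fun y => decide (y ≤ threshold) == decide (x ≤ threshold)) = (fun y => !p y) := by
          funext y
          simp only [hp] at hx ⊢
          simp [hx]
        have hdw : (xs.dropWhile (fun y => !p y)).length < n := by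
          have := List.length_dropWhile_le (fun y => !p y) xs
          simp only [List.length_cons] at hn
          omega
        have hrest := ih _ hdw (xs.dropWhile (fun y => !p y)) rfl
        have htw : ∀ y ∈ xs.takeWhile (fun y => !p y), p y = false := by
          intro y hy
          have := List.mem_takeWhile_imp hy
          simpa using this
        have hsplit : xs = xs.takeWhile (fun y => !p y) ++ xs.dropWhile (fun y => !p y) :=
          (List.takeWhile_append_dropWhile).symm
        have hbest : pvBest p xs = pvBest p (xs.dropWhile (fun y => !p y)) := by
          conv_lhs => rw [hsplit]
          exact pvBest_false_prefix p _ _ htw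
        simp only [countAltGo, hq, hp] at *
        simp only [hx, Bool.false_eq_true, if_false, hrest, pvBest, hbest]

-- A's fold: characterisation of the running state
theorem foldA_fst (threshold : Int) (l : List Int) :
    ∀ mx cur : Int, 0 ≤ cur → cur ≤ mx →
    (l.foldl (fun (st : Int × Int) mood =>
        if mood ≤ threshold then (max st.1 (st.2 + 1), st.2 + 1) else (st.1, 0))
      (mx, cur)).1
    = max mx (max (cur + pvLead (fun y => decide (y ≤ threshold)) l)
                  (pvBest (fun y => decide (y ≤ threshold)) l)) := by
  induction l with
  | nil =>
      intro mx cur h0 h1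
      simp [pvLead, pvBest]; omega
  | cons x xs ih =>
      intro mx cur h0 h1
      by_cases hx : x ≤ threshold
      · have := ih (max mx (cur + 1)) (cur + 1) (by omega) (by omega)
        have hl := pvLead_nonneg (fun y => decide (y ≤ threshold)) xs
        have hb := pvBest_nonneg (fun y => decide (y ≤ threshold)) xs
        simp only [List.foldl_cons, if_pos hx, this, pvLead, pvBest, decide_eq_true hx, if_true]
        omega
      · have hlb := pvLead_le_best (fun y => decide (y ≤ threshold)) xs
        simp only [List.foldl_cons, if_neg hx, ih mx 0 le_rfl (le_trans h0 h1), pvLead, pvBest,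
          decide_eq_false hx, Bool.false_eq_true, if_false]
        omega

-- ===== VERDICT (by name: the statement is the Claim_ definition above) =====
theorem count_consecutive_low_spec : Claim_equal_count_consecutive_low := by
  intro moods threshold _
  unfold Spec_count_consecutive_low count_consecutive_low count_consecutive_low_alt
  rw [foldA_fst threshold moods 0 0 le_rfl le_rfl, countAltGo_eq_best]
  have hl := pvLead_le_best (fun y => decide (y ≤ threshold)) moods
  have hb := pvBest_nonneg (fun y => decide (y ≤ threshold)) moods
  omega
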